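-- pv_equiv track=rewrite | github.com/bartonlab/paper-clonal-dynamics | src/analyze_and_plot.py | getSequenceEmergenceTimes
-- ===== SOURCE A (Python) =====
-- def seqToString(seq):
--     s = ""
--     for i in seq:
--         s += str(int(i))
--     return s
--
-- def getSequenceEmergenceTimes(nVec, sVec):
--     T = len(sVec)
--     emerge = {}
--     for t in range(T):
--         for s in range(len(nVec[t])):
--             if nVec[t][s] > 0 and seqToString(sVec[t][s]) not in emerge:
--                 emerge[seqToString(sVec[t][s])] = t
--     return emerge
-- ===== SOURCE B (Python) =====
-- def getSequenceEmergenceTimes(nVec, sVec):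
--     # Map-reduce: first collect EVERY emergence time per stringified sequence into a
--     # multimap (grouping pass), then reduce each group with min() to the earliest time.
--     groups = {}
--     for t, (nrow, srow) in enumerate(zip(nVec, sVec)):
--         for n, seq in zip(nrow, srow):
--             if n > 0:
--                 key = "".join(str(int(x)) for x in seq)
--                 groups[key] = groups.get(key, []) + [t]
--     return {k: min(ts) for k, ts in groups.items()}
-- ===== Notes on version B (the rewrite author's own statement) =====
-- stated objective: alternative
-- what changed: B is a map-reduce: a grouping pass collects EVERY time at which each stringified sequence is present (a multimap key -> list of times, no membership guard), and a reduction pass takes min() of each group; A instead maintains the answer dict directly with a first-seen membership guard.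
import Mathlib
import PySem

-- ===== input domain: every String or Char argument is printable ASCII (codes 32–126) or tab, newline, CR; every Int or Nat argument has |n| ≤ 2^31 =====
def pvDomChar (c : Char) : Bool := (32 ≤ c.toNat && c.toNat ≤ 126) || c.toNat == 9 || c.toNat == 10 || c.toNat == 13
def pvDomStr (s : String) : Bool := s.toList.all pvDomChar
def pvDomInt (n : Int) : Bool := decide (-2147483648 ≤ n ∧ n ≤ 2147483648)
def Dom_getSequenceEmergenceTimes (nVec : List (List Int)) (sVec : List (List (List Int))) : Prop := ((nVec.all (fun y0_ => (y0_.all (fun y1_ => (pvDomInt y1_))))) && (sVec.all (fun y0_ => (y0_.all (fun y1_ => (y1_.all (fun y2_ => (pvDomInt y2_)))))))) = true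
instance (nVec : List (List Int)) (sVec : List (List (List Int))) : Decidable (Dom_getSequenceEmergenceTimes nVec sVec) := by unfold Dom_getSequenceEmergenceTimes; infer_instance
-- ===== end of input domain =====

-- B is a map-reduce: a grouping pass collects every time each stringified sequence is
-- present into a multimap, then each group is reduced with min(); alternative
-- decomposition (no membership guard), same values, no speed claim.

-- ===== PORT A =====
-- str(int(i)) on a Python int i is str(i) → PySem.Int.toStr
def seqToString (seq : List Int) : String :=
  seq.foldl (fun s i => s ++ PySem.Int.toStr i) ""

-- range(T)/range(len(..)) ported as List.range (indices nonnegative); list indexing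
-- ported as getD, exact on Pre_ (out-of-range indexing = Python IndexError, excluded by Pre_)
def getSequenceEmergenceTimes (nVec : List (List Int)) (sVec : List (List (List Int))) : List (String × Int) :=
  let T := sVec.length
  let emerge : PySem.Dict String Int :=
    (List.range T).foldl (fun emerge t =>
      (List.range (nVec.getD t []).length).foldl (fun emerge s =>
        if (nVec.getD t []).getD s 0 > 0 && !(emerge.contains (seqToString ((sVec.getD t []).getD s []))) then
          emerge.insert (seqToString ((sVec.getD t []).getD s [])) (t : Int)
        else emerge) emerge) PySem.Dict.empty
  emerge.items

-- ===== PORT B =====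
def seqKey (seq : List Int) : String :=
  PySem.Str.join "" (seq.map (fun x => PySem.Int.toStr x))

-- groups[key] = groups.get(key, []) + [t] is Dict.modify key [] (· ++ [t]);
-- min(ts) on the (always nonempty) group is PySem.List.min? (first minimum), getD 0 unreachable
def getSequenceEmergenceTimes_alt (nVec : List (List Int)) (sVec : List (List (List Int))) : List (String × Int) :=
  let groups : PySem.Dict String (List Int) :=
    (PySem.List.enumerate (nVec.zip sVec) 0).foldl (fun d p =>
      (p.2.1.zip p.2.2).foldl (fun d q =>
        if q.1 > 0 then d.modify (seqKey q.2) [] (fun l => l ++ [p.1]) else d) d)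
      PySem.Dict.empty
  groups.items.map (fun kv => (kv.1, (PySem.List.min? kv.2 (fun x => x)).getD 0))

-- ===== PRECONDITION & SPEC =====
-- Pre_ excludes exactly the inputs where A raises IndexError: nVec shorter than sVec,
-- or a positive count nVec[t][s] whose sequence index s is out of range in sVec[t].
def Pre_getSequenceEmergenceTimes (nVec : List (List Int)) (sVec : List (List (List Int))) : Prop :=
  sVec.length ≤ nVec.length ∧
  ∀ t, t < sVec.length → ∀ s, s < (nVec.getD t []).length →
    (nVec.getD t []).getD s 0 > 0 → s < (sVec.getD t []).length
instance (nVec : List (List Int)) (sVec : List (List (List Int))) : Decidable (Pre_getSequenceEmergenceTimes nVec sVec) := by unfold Pre_getSequenceEmergenceTimes; infer_instance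

def pvWitness_getSequenceEmergenceTimes : List (List Int) × List (List (List Int)) :=
  ([[1, 0], [2, 1]], [[[0, 1], [1, 1]], [[1, 0], [0, 1]]])

def Spec_getSequenceEmergenceTimes (nVec : List (List Int)) (sVec : List (List (List Int))) (out : List (String × Int)) : Prop := out = getSequenceEmergenceTimes_alt nVec sVec
instance (nVec : List (List Int)) (sVec : List (List (List Int))) (out : List (String × Int)) : Decidable (Spec_getSequenceEmergenceTimes nVec sVec out) := by unfold Spec_getSequenceEmergenceTimes; infer_instance

-- ===== CLAIM (what is proved, stated in full; the proofs are below) =====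
def Claim_equal_getSequenceEmergenceTimes : Prop := ∀ (nVec : List (List Int)) (sVec : List (List (List Int))), Dom_getSequenceEmergenceTimes nVec sVec → Pre_getSequenceEmergenceTimes nVec sVec → Spec_getSequenceEmergenceTimes nVec sVec (getSequenceEmergenceTimes nVec sVec)

-- ===== LEMMAS AND PROOFS =====

-- the flattened chronological stream of (key, time) pairs both folds consume
def rowPairs (p : Int × (List Int × List (List Int))) : List (String × Int) :=
  (p.2.1.zip p.2.2).filterMap (fun q => if q.1 > 0 then some (seqKey q.2, p.1) else none)

theorem join_nil_cons (p : List Char) (rest : List (List Char)) :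
    PySem.Chars.join [] (p :: rest) = p ++ PySem.Chars.join [] rest := by
  cases rest with
  | nil => simp [PySem.Chars.join_singleton, PySem.Chars.join_nil]
  | cons q r => rw [PySem.Chars.join_cons_cons]; simp

theorem foldl_toList (seq : List Int) (a : String) :
    (seq.foldl (fun s i => s ++ PySem.Int.toStr i) a).toList
      = a.toList ++ PySem.Chars.join [] (seq.map (fun x => (PySem.Int.toStr x).toList)) := by
  induction seq generalizing a with
  | nil => simp [PySem.Chars.join_nil]
  | cons x xs ih =>
    simp only [List.foldl_cons, List.map_cons, join_nil_cons, ih, String.toList_append]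
    simp

theorem seqKey_eq_seqToString (seq : List Int) : seqKey seq = seqToString seq := by
  rw [← String.toList_inj, seqKey, PySem.Str.toList_join, seqToString, foldl_toList]
  simp [List.map_map, Function.comp_def, PySem.Int.toList_toStr]

-- A's inner index loop over a row equals the setdefault fold over that row's pair stream
theorem row_eq (nrow : List Int) (srow : List (List Int)) (d : PySem.Dict String Int) (v : Int)
    (h : ∀ s, s < nrow.length → nrow.getD s 0 > 0 → s < srow.length) :
    (List.range nrow.length).foldl (fun d s =>
        if nrow.getD s 0 > 0 && !(d.contains (seqToString (srow.getD s []))) then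
          d.insert (seqToString (srow.getD s [])) v
        else d) d
      = ((nrow.zip srow).filterMap
          (fun q => if q.1 > 0 then some (seqKey q.2, v) else none)).foldl
          (fun d kt => d.setdefault kt.1 kt.2) d := by
  induction nrow generalizing srow d with
  | nil => simp
  | cons n ns ih =>
    rw [List.length_cons, List.range_succ_eq_map, List.foldl_cons, List.foldl_map]
    simp only [List.getD_cons_zero, List.getD_cons_succ, Nat.succ_eq_add_one]
    cases srow with
    | nil =>
      have hn : ¬ n > 0 := fun hp => absurd (h 0 (by simp) hp) (by simp)
      simp only [List.getD_nil, List.zip_nil_right, List.filterMap_nil, List.foldl_nil]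
      rw [if_neg (by simp [hn])]
      have := ih [] d (fun s hs hp => absurd (h (s+1) (by simpa using hs) hp) (by simp))
      simpa using this
    | cons y ys =>
      simp only [List.getD_cons_zero, List.getD_cons_succ, List.zip_cons_cons]
      by_cases hn : n > 0
      · have hfm : List.filterMap (fun q => if q.1 > 0 then some (seqKey q.2, v) else none)
            ((n, y) :: ns.zip ys)
            = (seqToString y, v) :: List.filterMap
                (fun q => if q.1 > 0 then some (seqKey q.2, v) else none) (ns.zip ys) := by
          simp [hn, seqKey_eq_seqToString]
        rw [hfm, List.foldl_cons]
        have hstep : (if n > 0 && !(d.contains (seqToString y)) then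
            d.insert (seqToString y) v else d) = d.setdefault (seqToString y) v := by
          cases hc : d.contains (seqToString y) with
          | true => simp [PySem.Dict.setdefault_of_contains d v hc]
          | false => simp [hn, PySem.Dict.setdefault_of_not_contains d v hc]
        rw [hstep]
        exact ih ys _ (fun s hs hp => by
          have := h (s+1) (by simpa using hs) hp; simpa using this)
      · have hfm : List.filterMap (fun q => if q.1 > 0 then some (seqKey q.2, v) else none)
            ((n, y) :: ns.zip ys)
            = List.filterMap (fun q => if q.1 > 0 then some (seqKey q.2, v) else none)
                (ns.zip ys) := by
          simp [hn]
        rw [hfm, if_neg (by simp [hn])]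
        exact ih ys d (fun s hs hp => by
          have := h (s+1) (by simpa using hs) hp; simpa using this)

set_option maxRecDepth 4000 in
theorem grid_eq (sVec : List (List (List Int))) (nVec : List (List Int))
    (d : PySem.Dict String Int) (k : Nat)
    (hlen : sVec.length ≤ nVec.length)
    (h : ∀ t, t < sVec.length → ∀ s, s < (nVec.getD t []).length →
          (nVec.getD t []).getD s 0 > 0 → s < (sVec.getD t []).length) :
    (List.range sVec.length).foldl (fun d t =>
        (List.range (nVec.getD t []).length).foldl (fun d s =>
          if (nVec.getD t []).getD s 0 > 0 && !(d.contains (seqToString ((sVec.getD t []).getD s []))) then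
            d.insert (seqToString ((sVec.getD t []).getD s [])) ((k + t : Nat) : Int)
          else d) d) d
      = (PySem.List.enumerate (nVec.zip sVec) (k : Int)).foldl (fun d p =>
          (rowPairs p).foldl (fun d kt => d.setdefault kt.1 kt.2) d) d := by
  induction sVec generalizing nVec d k with
  | nil => simp [PySem.List.enumerate_nil]
  | cons srow ss ih =>
    cases nVec with
    | nil => simp at hlen
    | cons nrow nn =>
      rw [List.length_cons, List.range_succ_eq_map, List.foldl_cons, List.foldl_map,
        List.zip_cons_cons, PySem.List.enumerate_cons, List.foldl_cons]
      simp only [List.getD_cons_zero, List.getD_cons_succ, Nat.succ_eq_add_one, Nat.add_zero]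
      have hhead := row_eq nrow srow d ((k : Nat) : Int)
        (fun s hs hp => h 0 (by simp) s hs hp)
      rw [show rowPairs ((k : Int), (nrow, srow))
            = (nrow.zip srow).filterMap
                (fun q => if q.1 > 0 then some (seqKey q.2, (k : Int)) else none) from rfl,
        hhead]
      have hshift : ∀ t : Nat, k + (t + 1) = (k + 1) + t := fun t => by omega
      have hcast : ((k : Int) + 1) = (((k + 1 : Nat)) : Int) := by push_cast; ring
      rw [hcast]
      refine Eq.trans (PySem.List.foldl_congr_mem _ _ _ _ ?_)
        (ih nn _ (k + 1) (by simpa using hlen)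
          (fun t ht s hs hp => by
            have := h (t + 1) (by simpa using ht) s (by simpa using hs) (by simpa using hp)
            simpa using this))
      intro acc t _
      rw [hshift t]

-- B's inner zip loop over a row equals the modify-append fold over that row's pair stream
theorem rowB_eq (l : List (Int × List Int)) (v : Int) (d : PySem.Dict String (List Int)) :
    l.foldl (fun d q => if q.1 > 0 then d.modify (seqKey q.2) [] (fun g => g ++ [v]) else d) d
      = (l.filterMap (fun q => if q.1 > 0 then some (seqKey q.2, v) else none)).foldl
          (fun d kt => d.modify kt.1 [] (fun g => g ++ [kt.2])) d := by
  induction l generalizing d with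
  | nil => rfl
  | cons q qs ih =>
    by_cases hq : q.1 > 0
    · simp only [List.foldl_cons, List.filterMap_cons, if_pos hq]
      rw [ih]
    · simp only [List.foldl_cons, List.filterMap_cons, if_neg hq]
      rw [ih]

-- the lookup a setdefault fold produces: the stored value, else the FIRST matching pair
theorem get?_foldl_setdefault (l : List (String × Int)) (d : PySem.Dict String Int) (c : String) :
    (l.foldl (fun d p => d.setdefault p.1 p.2) d).get? c
      = (d.get? c).or (((l.filter (fun p => p.1 == c)).map (fun p => p.2)).head?) := by
  induction l generalizing d with
  | nil => simp
  | cons p ps ih =>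
    rw [List.foldl_cons, ih]
    by_cases hc : p.1 = c
    · subst hc
      rw [List.filter_cons_of_pos (by simp), List.map_cons, List.head?_cons,
        PySem.Dict.get?_setdefault_self]
      cases hd : d.get? p.1 <;> simp
    · rw [List.filter_cons_of_neg (by simpa using hc),
        PySem.Dict.get?_setdefault_of_ne d p.2 (fun h => hc h.symm)]

-- the key list a setdefault fold produces (first-insertion order)
theorem keys_foldl_setdefault (l : List (String × Int)) (d : PySem.Dict String Int) :
    (l.foldl (fun d p => d.setdefault p.1 p.2) d).keys
      = PySem.Set.update d.keys (l.map (fun p => p.1)) := by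
  induction l generalizing d with
  | nil => rfl
  | cons p ps ih =>
    rw [List.foldl_cons, ih, List.map_cons]
    have : (d.setdefault p.1 p.2).keys = PySem.Set.add d.keys p.1 := by
      by_cases hc : d.contains p.1 = true
      · rw [PySem.Dict.keys_setdefault, if_pos hc, PySem.Set.add,
          if_pos (by simpa [PySem.Set.contains] using (PySem.Dict.contains_iff_mem_keys d p.1).1 hc)]
      · rw [PySem.Dict.keys_setdefault, if_neg hc, PySem.Set.add,
          if_neg (by
            intro hmem
            exact hc ((PySem.Dict.contains_iff_mem_keys d p.1).2 (by simpa [PySem.Set.contains] using hmem)))]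
    rw [this]; rfl

-- snd components of the flattened stream are nondecreasing, and bounded below by the start
theorem pairs_mono (L : List (List Int × List (List Int))) (s : Int) :
    (∀ kt ∈ (PySem.List.enumerate L s).flatMap rowPairs, s ≤ kt.2) ∧
    (((PySem.List.enumerate L s).flatMap rowPairs).map (fun kt => kt.2)).Pairwise (· ≤ ·) := by
  induction L generalizing s with
  | nil => simp [PySem.List.enumerate_nil]
  | cons x L ih =>
    rw [PySem.List.enumerate_cons, List.flatMap_cons]
    have hrow : ∀ kt ∈ rowPairs (s, x), kt.2 = s := by
      intro kt hkt
      rcases List.mem_filterMap.1 hkt with ⟨q, _, hq⟩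
      by_cases h : q.1 > 0
      · rw [if_pos h] at hq; cases hq; rfl
      · rw [if_neg h] at hq; cases hq
    obtain ⟨ihb, ihp⟩ := ih (s + 1)
    constructor
    · intro kt hkt
      rcases List.mem_append.1 hkt with h | h
      · exact le_of_eq (hrow kt h).symm
      · exact le_trans (by omega) (ihb kt h)
    · rw [List.map_append, List.pairwise_append]
      refine ⟨?_, ihp, ?_⟩
      · refine List.pairwise_of_forall_mem_list ?_
        intro a ha b hb
        rcases List.mem_map.1 ha with ⟨kt, hkt, rfl⟩
        rcases List.mem_map.1 hb with ⟨kt', hkt', rfl⟩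
        rw [hrow kt hkt, hrow kt' hkt']
      · intro a ha b hb
        rcases List.mem_map.1 ha with ⟨kt, hkt, rfl⟩
        rcases List.mem_map.1 hb with ⟨kt', hkt', rfl⟩
        rw [hrow kt hkt]
        exact le_trans (by omega) (ihb kt' hkt')

-- core: on a time-nondecreasing pair stream, first-wins items = grouped items reduced by min
theorem items_eq (ps : List (String × Int))
    (hps : (ps.map (fun kt => kt.2)).Pairwise (· ≤ ·)) :
    (ps.foldl (fun d kt => d.setdefault kt.1 kt.2) (PySem.Dict.empty : PySem.Dict String Int)).items
      = ((ps.foldl (fun d kt => d.modify kt.1 [] (fun g => g ++ [kt.2]))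
            (PySem.Dict.empty : PySem.Dict String (List Int))).items).map
          (fun kv => (kv.1, (PySem.List.min? kv.2 (fun x => x)).getD 0)) := by
  set D1 := ps.foldl (fun d kt => d.setdefault kt.1 kt.2) (PySem.Dict.empty : PySem.Dict String Int) with hD1
  set D2 := ps.foldl (fun d kt => d.modify kt.1 [] (fun g => g ++ [kt.2]))
      (PySem.Dict.empty : PySem.Dict String (List Int)) with hD2
  have hk1 : D1.keys = PySem.Set.ofList (ps.map (fun p => p.1)) := by
    rw [hD1, keys_foldl_setdefault]; rfl
  have hk2 : D2.keys = PySem.Set.ofList (ps.map (fun p => p.1)) := by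
    rw [hD2, PySem.Dict.keys_foldl_modify_key ps (fun p => p.1) [] (fun _ kt => (fun g => g ++ [kt.2]))]
    rfl
  have hn1 : D1.keys.Nodup := by rw [hk1]; exact PySem.Set.nodup_ofList _
  have hn2 : D2.keys.Nodup := by rw [hk2]; exact PySem.Set.nodup_ofList _
  rw [PySem.Dict.items_eq_map_keys D1 hn1 0, PySem.Dict.items_eq_map_keys D2 hn2 [],
    List.map_map, hk1, hk2]
  refine List.map_congr_left ?_
  intro k hk
  have hmem : k ∈ ps.map (fun p => p.1) := (PySem.Set.mem_ofList _ _).1 hk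
  have hget2 : D2.getD k [] = (ps.filter (fun p => p.1 == k)).map (fun p => p.2) := by
    rw [hD2]
    have := PySem.Dict.getD_foldl_modify_append ps (PySem.Dict.empty : PySem.Dict String (List Int)) k
    simpa using this
  have hget1 : D1.get? k = ((ps.filter (fun p => p.1 == k)).map (fun p => p.2)).head? := by
    rw [hD1, get?_foldl_setdefault]; simp
  -- the filtered group is nonempty and its head is its minimum
  have hne : (ps.filter (fun p => p.1 == k)) ≠ [] := by
    rcases List.mem_map.1 hmem with ⟨p, hp, rfl⟩
    exact List.ne_nil_of_mem (List.mem_filter.2 ⟨hp, by simp⟩)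
  rcases hf : (ps.filter (fun p => p.1 == k)).map (fun p => p.2) with _ | ⟨t0, ts⟩
  · exact absurd (by simpa using congrArg List.length hf) (by simpa using hne)
  · have hsub : ((ps.filter (fun p => p.1 == k)).map (fun p => p.2)).Sublist
        (ps.map (fun kt => kt.2)) := List.Sublist.map _ List.filter_sublist
    have hpw : (t0 :: ts).Pairwise (· ≤ ·) := hf ▸ hps.sublist hsub
    have hmin : ∀ y ∈ ts, t0 ≤ y := (List.pairwise_cons.1 hpw).1
    have hfold : ts.foldl min t0 = t0 := by
      rcases PySem.List.foldl_min_mem ts t0 with h | h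
      · exact h
      · exact le_antisymm (PySem.List.foldl_min_le ts t0).1 (hmin _ h)
    simp only [Function.comp_def, hget2, hf, PySem.List.min?_id_cons, hfold,
      Option.getD_some]
    rw [PySem.Dict.getD_eq_get?_getD, hget1, hf]
    rfl

-- ===== VERDICT (by name: the statement is the Claim_ definition above) =====
theorem getSequenceEmergenceTimes_spec : Claim_equal_getSequenceEmergenceTimes := by
  intro nVec sVec _ hpre
  obtain ⟨hlen, h⟩ := hpre
  have mainA := grid_eq sVec nVec PySem.Dict.empty 0 hlen h
  simp only [Nat.zero_add, Nat.cast_zero] at mainA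
  unfold Spec_getSequenceEmergenceTimes
  simp only [getSequenceEmergenceTimes, getSequenceEmergenceTimes_alt]
  rw [mainA]
  -- flatten both nested folds over the enumerate list into folds over the flat pair stream
  have flatA : (PySem.List.enumerate (nVec.zip sVec) 0).foldl (fun d p =>
        (rowPairs p).foldl (fun d kt => d.setdefault kt.1 kt.2) d) PySem.Dict.empty
      = ((PySem.List.enumerate (nVec.zip sVec) 0).flatMap rowPairs).foldl
          (fun d kt => d.setdefault kt.1 kt.2) PySem.Dict.empty := by
    rw [List.flatMap_def, List.foldl_flatten, List.foldl_map]
  have flatB : (PySem.List.enumerate (nVec.zip sVec) 0).foldl (fun d p =>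
        (p.2.1.zip p.2.2).foldl (fun d q =>
          if q.1 > 0 then d.modify (seqKey q.2) [] (fun g => g ++ [p.1]) else d) d)
        PySem.Dict.empty
      = ((PySem.List.enumerate (nVec.zip sVec) 0).flatMap rowPairs).foldl
          (fun d kt => d.modify kt.1 [] (fun g => g ++ [kt.2])) PySem.Dict.empty := by
    rw [List.flatMap_def, List.foldl_flatten, List.foldl_map]
    refine PySem.List.foldl_congr_mem _ _ _ _ ?_
    intro acc p _
    exact rowB_eq (p.2.1.zip p.2.2) p.1 acc
  rw [flatA, flatB]
  exact items_eq _ (pairs_mono (nVec.zip sVec) 0).2
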